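-- pv_equiv track=rewrite | github.com/syahrulhamdani/roleplaybot | server/sesame.py | format_env_contents
-- ===== SOURCE A (Python) =====
-- from typing import Callable, Dict, Literal
--
-- def format_env_contents(
--     current_contents: list[str], updates: Dict[str, str]
-- ) -> list[str]:
--     """Format the environment contents with updates."""
--     env_contents = current_contents.copy()
--
--     # Update each variable
--     for var_name, var_value in updates.items():
--         var_found = False
--         for i, line in enumerate(env_contents):
--             if line.strip().startswith(f"{var_name}="):
--                 env_contents[i] = f'{var_name}="{var_value}"\n'
--                 var_found = True
--                 break
--
--         if not var_found:
--             env_contents.append(f'{var_name}="{var_value}"\n')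
--
--     return env_contents
-- ===== SOURCE B (Python) =====
-- def format_env_contents(current_contents, updates):
--     """Format the environment contents with updates: one pass over the lines
--     (each line takes the first not-yet-used update whose name prefixes it),
--     then one pass over the updates appending the unused ones."""
--     env_contents = []
--     used = set()
--     for line in current_contents:
--         stripped = line.strip()
--         for name, value in updates.items():
--             if name not in used and stripped.startswith(name + "="):
--                 env_contents.append(f'{name}="{value}"\n')
--                 used.add(name)
--                 break
--         else:
--             env_contents.append(line)
--     for name, value in updates.items():
--         if name not in used:
--             env_contents.append(f'{name}="{value}"\n')
--     return env_contents
-- ===== Notes on version B (the rewrite author's own statement) =====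
-- stated objective: faster
-- what changed: A scans the whole (mutating) line list once per update and appends misses inline; B interchanges the loops (strip each line once, no repeated rescans of the growing list): one pass over the lines where each line takes the first not-yet-used update whose name prefixes it (a 'used' set), then one pass over the updates appending the unused ones. Pre_ excludes assoc lists with duplicate keys (no Python-dict counterpart) and 'cascading' updates, where one update's name matches the line A writes for another update and A may rewrite a line it itself just wrote or appended.
-- outside the precondition, e.g. on format_env_contents([], {' A': '1', 'A': '2'}): A returns ['A="2"\n'], B returns [' A="1"\n', 'A="2"\n']
import Mathlib
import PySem

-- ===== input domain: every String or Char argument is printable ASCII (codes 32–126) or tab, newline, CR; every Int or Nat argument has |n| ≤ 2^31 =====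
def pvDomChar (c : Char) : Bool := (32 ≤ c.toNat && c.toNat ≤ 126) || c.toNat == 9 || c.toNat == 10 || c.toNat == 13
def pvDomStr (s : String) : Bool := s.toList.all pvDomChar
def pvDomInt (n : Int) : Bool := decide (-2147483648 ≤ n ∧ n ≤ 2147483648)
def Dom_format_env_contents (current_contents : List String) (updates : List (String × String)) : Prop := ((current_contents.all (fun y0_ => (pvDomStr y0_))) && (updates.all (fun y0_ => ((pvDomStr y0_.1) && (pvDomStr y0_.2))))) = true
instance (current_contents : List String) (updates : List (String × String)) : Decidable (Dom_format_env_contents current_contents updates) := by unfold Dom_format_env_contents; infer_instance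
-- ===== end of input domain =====

-- B interchanges A's loops: A scans the whole line list once per update; B makes one
-- pass over the lines (each line takes the first not-yet-used update matching it) and
-- then one pass over the updates appending the unused ones (objective: alternative
-- decomposition; return-value equivalence only — A does not mutate its arguments).

-- shared formatting helper: the f-string f'{name}="{value}"\n', built on char lists
-- (exact: pure concatenation)
def mkLineL (n v : List Char) : List Char := n ++ ('=' :: '"' :: (v ++ ['"', '\n']))
def mkLine (n v : String) : String := String.ofList (mkLineL n.toList v.toList)

-- ===== PORT A =====
-- line.strip().startswith(f"{var_name}=")
def matchA (n line : String) : Bool :=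
  PySem.Chars.startswith (PySem.Chars.strip line.toList) (n.toList ++ ['='])

-- A's inner 'for i, line in enumerate(env_contents): … break': first matching line replaced, none = not found
def replaceFirstA (n w : String) : List String → Option (List String)
  | [] => none
  | l :: ls => if matchA n l then some (w :: ls) else (replaceFirstA n w ls).map (l :: ·)

-- one iteration of A's outer 'for var_name, var_value in updates.items()'
def stepA (env : List String) (p : String × String) : List String :=
  match replaceFirstA p.1 (mkLine p.1 p.2) env with
  | some env' => env'
  | none => env ++ [mkLine p.1 p.2]

def format_env_contents (current_contents : List String) (updates : List (String × String)) : List String :=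
  updates.foldl stepA current_contents

-- ===== PORT B =====
-- B's inner 'for name, value in updates.items(): … break': the first update whose name
-- is unused and prefixes the stripped line (s = the precomputed line.strip())
def findKeyB : List (String × String) → PySem.Set String → List Char → Option (String × String)
  | [], _, _ => none
  | (k, w) :: rest, used, s =>
    if !used.contains k && PySem.Chars.startswith s (k.toList ++ ['=']) then some (k, w)
    else findKeyB rest used s

-- B's single pass over the lines: emitted lines plus the 'used' set
def passB (updates : List (String × String)) : List String → PySem.Set String → List String × PySem.Set String
  | [], used => ([], used)
  | l :: ls, used =>
    match findKeyB updates used (PySem.Chars.strip l.toList) with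
    | some (k, w) => let r := passB updates ls (used.add k); (mkLine k w :: r.1, r.2)
    | none => let r := passB updates ls used; (l :: r.1, r.2)

-- B's second pass: append the updates whose name was never used
def appendB : List (String × String) → PySem.Set String → List String
  | [], _ => []
  | (n, v) :: rest, used =>
    if used.contains n then appendB rest used else mkLine n v :: appendB rest used

def format_env_contents_alt (current_contents : List String) (updates : List (String × String)) : List String :=
  let r := passB updates current_contents PySem.Set.empty
  r.1 ++ appendB updates r.2

-- ===== PRECONDITION & SPEC =====
-- Pre_-local copy of the shape of a written line f'{name}="{value}"\n' (Pre_ may not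
-- reference the ports' helpers, so the concatenation is restated here)
def fmtLineOf (k v : String) : List Char := k.toList ++ ('=' :: '"' :: (v.toList ++ ['"', '\n']))

-- Pre_ excludes assoc lists with duplicate keys (a Python dict cannot carry them) and
-- 'cascading' updates — one update's name matching the line A writes for another update —
-- where A may re-match and rewrite a line it itself just wrote or appended, an accident of
-- A's in-place rescanning that no caller relies on; B rewrites each original line at most once.
def Pre_format_env_contents (current_contents : List String) (updates : List (String × String)) : Prop :=
  (updates.map Prod.fst).Nodup ∧
  (updates.all (fun p => updates.all (fun q =>
    p.1 == q.1 || !PySem.Chars.startswith (PySem.Chars.strip (fmtLineOf p.1 p.2)) (q.1.toList ++ ['='])))) = true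
instance (current_contents : List String) (updates : List (String × String)) : Decidable (Pre_format_env_contents current_contents updates) := by unfold Pre_format_env_contents; infer_instance

def pvWitness_format_env_contents : List String × (List (String × String)) :=
  (["FOO=1\n", "# comment\n", "BAR=old\n"], [("BAR", "new"), ("BAZ", "3")])

def Spec_format_env_contents (current_contents : List String) (updates : List (String × String)) (out : List String) : Prop := out = format_env_contents_alt current_contents updates
instance (current_contents : List String) (updates : List (String × String)) (out : List String) : Decidable (Spec_format_env_contents current_contents updates out) := by unfold Spec_format_env_contents; infer_instance

-- ===== CLAIM (what is proved, stated in full; the proofs are below) =====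
def Claim_equal_format_env_contents : Prop := ∀ (current_contents : List String) (updates : List (String × String)), Dom_format_env_contents current_contents updates → Pre_format_env_contents current_contents updates → Spec_format_env_contents current_contents updates (format_env_contents current_contents updates)

-- ===== LEMMAS AND PROOFS =====

theorem pvWitness_ok : Dom_format_env_contents (pvWitness_format_env_contents.1) (pvWitness_format_env_contents.2) ∧ Pre_format_env_contents (pvWitness_format_env_contents.1) (pvWitness_format_env_contents.2) := by decide

-- `contains` after a Set.add
theorem set_contains_add (u : PySem.Set String) (n m : String) :
    (u.add n).contains m = (u.contains m || m == n) := by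
  by_cases h : m ∈ u.add n
  · rw [(PySem.Set.contains_iff _ _).2 h]
    rcases (PySem.Set.mem_add u n m).1 h with h' | h'
    · rw [(PySem.Set.contains_iff _ _).2 h']; rfl
    · subst h'; simp
  · have h1 : ¬ m ∈ u := fun hm => h ((PySem.Set.mem_add u n m).2 (Or.inl hm))
    have h2 : ¬ m = n := fun hm => h ((PySem.Set.mem_add u n m).2 (Or.inr hm))
    have e1 : u.contains m = false := by
      cases hc : u.contains m
      · rfl
      · exact absurd ((PySem.Set.contains_iff _ _).1 hc) h1
    have e2 : (u.add n).contains m = false := by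
      cases hc : (u.add n).contains m
      · rfl
      · exact absurd ((PySem.Set.contains_iff _ _).1 hc) h
    simp [h2]

-- the shared mkLine and Pre_'s own fmtLineOf spell the same characters
theorem toList_mkLine (n v : String) : (mkLine n v).toList = fmtLineOf n v := by
  unfold mkLine mkLineL fmtLineOf
  rw [String.toList_ofList]

theorem lookup_cons_self (n : String) (v : String) (rest : List (String × String)) :
    List.lookup n ((n, v) :: rest) = some v := by simp [List.lookup]

theorem lookup_cons_ne (n m v : String) (rest : List (String × String)) (h : ¬ m = n) :
    List.lookup m ((n, v) :: rest) = List.lookup m rest := by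
  simp [List.lookup, beq_eq_false_iff_ne.2 h]

theorem lookup_none_not_key (n : String) :
    ∀ (rest : List (String × String)), List.lookup n rest = none →
      ∀ p ∈ rest, ¬ (p.1 = n) := by
  intro rest
  induction rest with
  | nil => intro _ p hp; simp at hp
  | cons q t ih =>
    intro h p hp
    rcases q with ⟨k, w⟩
    by_cases hk : n = k
    · subst hk; rw [lookup_cons_self] at h; exact absurd h (by simp)
    · have ht : List.lookup n t = none := by
        rwa [lookup_cons_ne k n w t hk] at h
      rcases List.mem_cons.1 hp with hp | hp
      · intro he; apply hk; rw [hp] at he; exact he.symm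
      · exact ih ht p hp

theorem lookup_eq_none_of_not_mem_keys (n : String) :
    ∀ (rest : List (String × String)), n ∉ rest.map Prod.fst → List.lookup n rest = none := by
  intro rest
  induction rest with
  | nil => intro _; rfl
  | cons q t ih =>
    intro h
    rcases q with ⟨k, w⟩
    have hk : ¬ n = k := by intro h0; exact h (by simp [h0])
    rw [lookup_cons_ne k n w t hk]
    exact ih (by intro h0; exact h (by simp [h0]))

-- facts about B's inner scan
theorem findKeyB_mem : ∀ (upd : List (String × String)) (u : PySem.Set String) (s : List Char)
    (p : String × String), findKeyB upd u s = some p → p ∈ upd := by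
  intro upd
  induction upd with
  | nil => intro u s p h; exact absurd h (by simp [findKeyB])
  | cons q t ih =>
    intro u s p h
    rcases q with ⟨k, w⟩
    unfold findKeyB at h
    by_cases hc : (!u.contains k && PySem.Chars.startswith s (k.toList ++ ['='])) = true
    · rw [if_pos hc] at h
      exact List.mem_cons.2 (Or.inl (Option.some.inj h).symm)
    · rw [if_neg hc] at h
      exact List.mem_cons.2 (Or.inr (ih u s p h))

theorem findKeyB_congr : ∀ (upd : List (String × String)) (u1 u2 : PySem.Set String) (s : List Char),
    (∀ p ∈ upd, u1.contains p.1 = u2.contains p.1) → findKeyB upd u1 s = findKeyB upd u2 s := by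
  intro upd
  induction upd with
  | nil => intro _ _ _ _; rfl
  | cons q t ih =>
    intro u1 u2 s h
    rcases q with ⟨k, w⟩
    unfold findKeyB
    rw [h (k, w) (by simp), ih u1 u2 s (fun p hp => h p (by simp [hp]))]

theorem findKeyB_cons_used (k w : String) (rest : List (String × String))
    (u : PySem.Set String) (s : List Char) (h : u.contains k = true) :
    findKeyB ((k, w) :: rest) u s = findKeyB rest u s := by
  have he : findKeyB ((k, w) :: rest) u s
      = if !u.contains k && PySem.Chars.startswith s (k.toList ++ ['=']) then some (k, w)
        else findKeyB rest u s := rfl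
  rw [he, h]
  simp

theorem findKeyB_none_of_no_match : ∀ (upd : List (String × String)) (u : PySem.Set String)
    (s : List Char), (∀ p ∈ upd, PySem.Chars.startswith s (p.1.toList ++ ['=']) = false) →
    findKeyB upd u s = none := by
  intro upd
  induction upd with
  | nil => intro _ _ _; rfl
  | cons q t ih =>
    intro u s h
    rcases q with ⟨k, w⟩
    unfold findKeyB
    rw [h (k, w) (by simp)]
    simp only [Bool.and_false, Bool.false_eq_true, if_false]
    exact ih u s (fun p hp => h p (by simp [hp]))

-- with no updates, B's line pass is the identity
theorem passB_nil_updates : ∀ (ls : List String) (u : PySem.Set String), passB [] ls u = (ls, u) := by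
  intro ls
  induction ls with
  | nil => intro u; rfl
  | cons l t ih =>
    intro u
    simp [passB, findKeyB, ih]

theorem stepA_cons_not (n v : String) (l : String) (ls : List String) (h : matchA n l = false) :
    stepA (l :: ls) (n, v) = l :: stepA ls (n, v) := by
  have hrf : replaceFirstA n (mkLine n v) (l :: ls)
      = if matchA n l = true then some (mkLine n v :: ls)
        else (replaceFirstA n (mkLine n v) ls).map (l :: ·) := rfl
  unfold stepA
  rw [hrf, if_neg (by simp [h])]
  cases hr : replaceFirstA n (mkLine n v) ls <;> simp [hr]

-- appendB only looks at its own keys in the used set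
theorem appendB_congr : ∀ (upd : List (String × String)) (u1 u2 : PySem.Set String),
    (∀ p ∈ upd, u1.contains p.1 = u2.contains p.1) → appendB upd u1 = appendB upd u2 := by
  intro upd
  induction upd with
  | nil => intro _ _ _; rfl
  | cons q t ih =>
    intro u1 u2 h
    rcases q with ⟨n, v⟩
    unfold appendB
    rw [h (n, v) (by simp), ih u1 u2 (fun p hp => h p (by simp [hp]))]

-- dropping an already-used key from the update list does not change the emitted lines,
-- and only removes that key from the resulting used set
theorem pass_drop_key (n v : String) (rest : List (String × String))
    (hr : List.lookup n rest = none) :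
    ∀ (ls : List String) (u1 u2 : PySem.Set String),
      (∀ m, u1.contains m = (u2.contains m || m == n)) →
      (passB ((n, v) :: rest) ls u1).1 = (passB rest ls u2).1 ∧
      (∀ m, (passB ((n, v) :: rest) ls u1).2.contains m
          = ((passB rest ls u2).2.contains m || m == n)) := by
  intro ls
  induction ls with
  | nil => intro u1 u2 h; exact ⟨rfl, h⟩
  | cons l t ih =>
    intro u1 u2 h
    have hu1n : u1.contains n = true := by rw [h n]; simp
    have hfk : findKeyB ((n, v) :: rest) u1 (PySem.Chars.strip l.toList)
        = findKeyB rest u2 (PySem.Chars.strip l.toList) := by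
      rw [findKeyB_cons_used n v rest u1 _ hu1n]
      apply findKeyB_congr
      intro p hp
      rw [h p.1, beq_eq_false_iff_ne.2 (lookup_none_not_key n rest hr p hp)]
      simp
    cases hres : findKeyB rest u2 (PySem.Chars.strip l.toList) with
    | none =>
      simp only [passB, hfk, hres]
      rcases ih u1 u2 h with ⟨h1, h2⟩
      exact ⟨by rw [h1], h2⟩
    | some p =>
      rcases p with ⟨k, w⟩
      have hkn : ¬ (k = n) := lookup_none_not_key n rest hr (k, w) (findKeyB_mem rest u2 _ _ hres)
      have hadd : ∀ m', (u1.add k).contains m' = ((u2.add k).contains m' || m' == n) := by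
        intro m'
        rw [set_contains_add, set_contains_add, h m']
        cases h1 : u2.contains m' <;> cases h2 : m' == k <;> cases h3 : m' == n <;> simp
      simp only [passB, hfk, hres]
      rcases ih (u1.add k) (u2.add k) hadd with ⟨h1, h2⟩
      exact ⟨by rw [h1], h2⟩

-- the key commuting step: doing one of A's updates first, then B on the rest,
-- is B on the whole update list
theorem step_comm (n v : String) (rest : List (String × String))
    (hr : List.lookup n rest = none)
    (hnc : ∀ p ∈ rest, matchA p.1 (mkLine n v) = false) :
    ∀ (cc : List String) (u : PySem.Set String), u.contains n = false →
      ((passB ((n, v) :: rest) cc u).1 ++ appendB ((n, v) :: rest) (passB ((n, v) :: rest) cc u).2)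
      = ((passB rest (stepA cc (n, v)) u).1 ++ appendB rest (passB rest (stepA cc (n, v)) u).2) := by
  have hnomatch : ∀ (u' : PySem.Set String),
      findKeyB rest u' (PySem.Chars.strip (mkLine n v).toList) = none := by
    intro u'
    exact findKeyB_none_of_no_match rest u' _ (fun p hp => hnc p hp)
  intro cc
  induction cc with
  | nil =>
    intro u hu
    have hstep : stepA [] (n, v) = [mkLine n v] := rfl
    rw [hstep]
    simp only [passB, hnomatch u, appendB, hu]
    simp
  | cons l t ih =>
    intro u hu
    cases hm : matchA n l with
    | true =>
      have hfk : findKeyB ((n, v) :: rest) u (PySem.Chars.strip l.toList) = some (n, v) := by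
        have he : findKeyB ((n, v) :: rest) u (PySem.Chars.strip l.toList)
            = if !u.contains n
                && PySem.Chars.startswith (PySem.Chars.strip l.toList) (n.toList ++ ['=']) then
                some (n, v)
              else findKeyB rest u (PySem.Chars.strip l.toList) := rfl
        rw [he, if_pos (by rw [hu]; simpa [matchA] using hm)]
      have hrf : replaceFirstA n (mkLine n v) (l :: t)
          = if matchA n l = true then some (mkLine n v :: t)
            else (replaceFirstA n (mkLine n v) t).map (l :: ·) := rfl
      have hstep : stepA (l :: t) (n, v) = mkLine n v :: t := by
        unfold stepA
        rw [hrf, if_pos hm]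
      rw [hstep]
      simp only [passB, hfk, hnomatch u]
      rcases pass_drop_key n v rest hr t (u.add n) u (fun m => set_contains_add u n m)
        with ⟨hlines, hused⟩
      rw [hlines]
      have happ : appendB ((n, v) :: rest) (passB ((n, v) :: rest) t (u.add n)).2
          = appendB rest (passB rest t u).2 := by
        simp only [appendB, hused n, BEq.refl, Bool.or_true, if_true]
        apply appendB_congr
        intro p hp
        rw [hused p.1,
          beq_eq_false_iff_ne.2 (lookup_none_not_key n rest hr p hp)]
        simp
      rw [happ]
    | false =>
      rw [stepA_cons_not n v l t hm]
      have hfk : findKeyB ((n, v) :: rest) u (PySem.Chars.strip l.toList)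
          = findKeyB rest u (PySem.Chars.strip l.toList) := by
        have he : findKeyB ((n, v) :: rest) u (PySem.Chars.strip l.toList)
            = if !u.contains n
                && PySem.Chars.startswith (PySem.Chars.strip l.toList) (n.toList ++ ['=']) then
                some (n, v)
              else findKeyB rest u (PySem.Chars.strip l.toList) := rfl
        rw [he, show PySem.Chars.startswith (PySem.Chars.strip l.toList) (n.toList ++ ['=']) = false
          from hm]
        simp
      cases hres : findKeyB rest u (PySem.Chars.strip l.toList) with
      | none =>
        simp only [passB, hfk, hres]
        simpa using ih u hu
      | some p =>
        rcases p with ⟨k, w⟩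
        have hkn : ¬ (k = n) := lookup_none_not_key n rest hr (k, w) (findKeyB_mem rest u _ _ hres)
        have hu' : (u.add k).contains n = false := by
          rw [set_contains_add, hu, beq_eq_false_iff_ne.2 (fun h0 => hkn h0.symm)]
          rfl
        simp only [passB, hfk, hres]
        simpa using ih (u.add k) hu'

-- ===== VERDICT (by name: the statement is the Claim_ definition above) =====
theorem format_env_contents_spec : Claim_equal_format_env_contents := by
  unfold Claim_equal_format_env_contents
  intro cc updates hdom hpre
  unfold Spec_format_env_contents
  rcases hpre with ⟨hnd, hok⟩
  clear hdom
  induction updates generalizing cc with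
  | nil =>
    unfold format_env_contents format_env_contents_alt
    rw [passB_nil_updates]
    simp [appendB]
  | cons p rest ih =>
    rcases p with ⟨n, v⟩
    have hok' : (rest.all (fun p => rest.all (fun q =>
        p.1 == q.1 || !PySem.Chars.startswith (PySem.Chars.strip (fmtLineOf p.1 p.2))
          (q.1.toList ++ ['='])))) = true := by
      apply List.all_eq_true.2
      intro p hp
      apply List.all_eq_true.2
      intro q hq
      exact List.all_eq_true.1 (List.all_eq_true.1 hok p (by simp [hp])) q (by simp [hq])
    have hnd' : (rest.map Prod.fst).Nodup := (List.nodup_cons.1 hnd).2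
    have hnin : n ∉ rest.map Prod.fst := (List.nodup_cons.1 hnd).1
    have hr : List.lookup n rest = none := lookup_eq_none_of_not_mem_keys n rest hnin
    have hnc : ∀ p ∈ rest, matchA p.1 (mkLine n v) = false := by
      intro p hp
      have hpq := List.all_eq_true.1 (List.all_eq_true.1 hok (n, v) (by simp)) p
        (by simp [hp])
      have hne : (p.1 == n) = false :=
        beq_eq_false_iff_ne.2 (lookup_none_not_key n rest hr p hp)
      rw [show ((n, v).1 == p.1) = false from by
          simpa [BEq.comm] using hne] at hpq
      unfold matchA
      rw [toList_mkLine]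
      simpa using hpq
    have hstep := step_comm n v rest hr hnc cc PySem.Set.empty (by rfl)
    unfold format_env_contents at *
    rw [List.foldl_cons]
    rw [ih (stepA cc (n, v)) hnd' hok']
    unfold format_env_contents_alt
    simp only
    exact hstep.symm
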